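-- pv_equiv track=rewrite | github.com/ohtap/ohtap | subcorpora_tool/find_subcorpora_v3.py | highlight_context
-- ===== SOURCE A (Python) =====
-- HIGHLIGHTED_WORDS_AROUND = 100 # The number of words we want before and after (separate) for in-context
--
-- def highlight_context(c):
-- 	all_words = c.split(" ")
-- 	modified_words = []
-- 	start = False
-- 	count = 0
-- 	for w in all_words:
-- 		if start: count += 1
-- 		if "</b>" in w:
-- 			count = 0
-- 			start = True
-- 		if count == HIGHLIGHTED_WORDS_AROUND:
-- 			count = 0
-- 			w = "{}</mark>".format(w)
-- 			start = False
-- 		modified_words.append(w)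
-- 	if start: modified_words[-1] = "{}</mark>".format(modified_words[-1])
-- 	all_words = modified_words
-- 	all_words.reverse()
--
-- 	modified_words = []
-- 	start = False
-- 	count = 0
-- 	for w in all_words:
-- 		if start: count += 1
-- 		if "<b>" in w:
-- 			count = 0
-- 			start = True
-- 		if count == HIGHLIGHTED_WORDS_AROUND:
-- 			count = 0
-- 			w = "<mark>{}".format(w)
-- 			start = False
-- 		modified_words.append(w)
-- 	if start: modified_words[-1] = "<mark>{}".format(modified_words[-1])
-- 	modified_words.reverse()
--
-- 	new_c = " ".join(modified_words)
--
-- 	return new_c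
-- ===== SOURCE B (Python) =====
-- HIGHLIGHTED_WORDS_AROUND = 100 # The number of words we want before and after (separate) for in-context
--
-- def _mark_ends(words, tag, fmt):
--     # Phase 1: prefix scan of the index of the last tag-bearing word (or -1).
--     # Phase 2: pure per-index rule: mark the word exactly 100 after a tag
--     # (distance measured from the most recent tag), or the final word when the
--     # most recent tag is less than 100 words back.
--     n = len(words)
--     last = []
--     L = -1
--     for j, w in enumerate(words):
--         if tag in w:
--             L = j
--         last.append(L)
--     out = []
--     for j, (Lj, w) in enumerate(zip(last, words)):
--         if Lj >= 0 and (j - Lj == HIGHLIGHTED_WORDS_AROUND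
--                         or (j == n - 1 and j - Lj < HIGHLIGHTED_WORDS_AROUND)):
--             w = fmt(w)
--         out.append(w)
--     return out
--
-- def highlight_context(c):
--     step1 = _mark_ends(c.split(" "), "</b>", lambda w: w + "</mark>")
--     step2 = _mark_ends(list(reversed(step1)), "<b>", lambda w: "<mark>" + w)
--     return " ".join(reversed(step2))
-- ===== Notes on version B (the rewrite author's own statement) =====
-- stated objective: alternative
-- what changed: Replaces A's stateful flag+counter scans (with a post-loop last-element patch) by a two-phase pass: a prefix scan recording the index of the most recent tag, then a pure per-index arithmetic rule (mark at distance exactly 100, or at the final word when the last tag is under 100 back).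
import Mathlib
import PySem

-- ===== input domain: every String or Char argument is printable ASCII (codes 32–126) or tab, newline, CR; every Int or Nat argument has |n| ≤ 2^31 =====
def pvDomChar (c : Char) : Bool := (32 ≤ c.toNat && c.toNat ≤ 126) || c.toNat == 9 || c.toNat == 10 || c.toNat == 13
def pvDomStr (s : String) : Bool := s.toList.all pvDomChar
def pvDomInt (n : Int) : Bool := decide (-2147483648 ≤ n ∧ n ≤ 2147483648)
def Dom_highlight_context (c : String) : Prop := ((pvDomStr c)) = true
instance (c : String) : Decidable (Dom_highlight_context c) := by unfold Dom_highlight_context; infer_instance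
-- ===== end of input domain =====

-- B replaces A's flag+counter scans by a prefix scan of last-tag indices plus a
-- per-index arithmetic marking rule (alternative decomposition, same cost).

-- ===== PORT A =====
-- modified_words[-1] = f(modified_words[-1]); the [] case (Python IndexError) is
-- unreachable at the call site (start=True implies a nonempty list).
def pySetLast (f : String → String) (xs : List String) : List String :=
  match xs.getLast? with
  | some x => xs.dropLast ++ [f x]
  | none => xs

-- body of A's for-loop (identical in both passes up to tag/format)
def pvStepA (tag : String) (fmt : String → String)
    (acc : List String × Bool × Int) (w : String) : List String × Bool × Int :=
  let count := if acc.2.1 then acc.2.2 + 1 else acc.2.2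
  let count := if PySem.Str.isIn tag w then 0 else count
  let start := if PySem.Str.isIn tag w then true else acc.2.1
  let fire := count == (100 : Int)
  let w' := if fire then fmt w else w
  let count' := if fire then 0 else count
  let start' := if fire then false else start
  (acc.1 ++ [w'], start', count')

-- one of A's two identical loop+tail blocks
def pvPassA (tag : String) (fmt : String → String) (all_words : List String) : List String :=
  let r := all_words.foldl (pvStepA tag fmt) ([], false, 0)
  if r.2.1 then pySetLast fmt r.1 else r.1

def highlight_context (c : String) : String :=
  let all_words := ((PySem.Str.split? c " ").getD [])
  let all_words := (pvPassA "</b>" (fun w => w ++ "</mark>") all_words).reverse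
  let modified_words := pvPassA "<b>" (fun w => "<mark>" ++ w) all_words
  PySem.Str.join " " modified_words.reverse

-- ===== PORT B =====
-- _mark_ends from Source B: prefix scan of last tag index, then per-index rule
def pvMarkEnds (tag : String) (fmt : String → String) (words : List String) : List String :=
  let n : Int := (words.length : Int)
  let last := ((PySem.List.enumerate words).foldl
      (fun (acc : List Int × Int) jw =>
        let L := if PySem.Str.isIn tag jw.2 then jw.1 else acc.2
        (acc.1 ++ [L], L)) ([], -1)).1
  (PySem.List.enumerate (last.zip words)).foldl
      (fun (out : List String) x =>
        out ++ [if 0 ≤ x.2.1 ∧ (x.1 - x.2.1 = 100 ∨ (x.1 = n - 1 ∧ x.1 - x.2.1 < 100))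
                then fmt x.2.2 else x.2.2]) []

def highlight_context_alt (c : String) : String :=
  let step1 := pvMarkEnds "</b>" (fun w => w ++ "</mark>") ((PySem.Str.split? c " ").getD [])
  let step2 := pvMarkEnds "<b>" (fun w => "<mark>" ++ w) step1.reverse
  PySem.Str.join " " step2.reverse

-- ===== PRECONDITION & SPEC =====
def Spec_highlight_context (c : String) (out : String) : Prop := out = highlight_context_alt c
instance (c : String) (out : String) : Decidable (Spec_highlight_context c out) := by unfold Spec_highlight_context; infer_instance

-- ===== CLAIM (what is proved, stated in full; the proofs are below) =====
def Claim_equal_highlight_context : Prop := ∀ (c : String), Dom_highlight_context c → Spec_highlight_context c (highlight_context c)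

-- ===== LEMMAS AND PROOFS =====

-- distance-since-last-tag automaton: none = no tag yet, some d = last tag d words back
def pvStepD (tag : String) (s : Option Nat) (w : String) : Option Nat :=
  if PySem.Str.isIn tag w then some 0 else s.map (· + 1)

def pvDist (tag : String) (ws : List String) : Option Nat := ws.foldl (pvStepD tag) none

-- A's `start` flag / `count` variable after the loop has consumed ws
def pvStart (tag : String) (ws : List String) : Bool :=
  match pvDist tag ws with
  | some d => decide (d < 100)
  | none => false

def pvCount (tag : String) (ws : List String) : Int :=
  match pvDist tag ws with
  | some d => if d < 100 then (d : Int) else 0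
  | none => 0

-- marks produced inside A's loop (before the tail fix)
def pvSpecNoTail (tag : String) (fmt : String → String) (ws : List String) : List String :=
  ws.mapIdx (fun j w => if pvDist tag (ws.take (j + 1)) = some 100 then fmt w else w)

-- full marking rule including the tail fix
def pvQF (tag : String) (ws : List String) (j : Nat) : Bool :=
  (pvDist tag (ws.take (j + 1)) == some 100) || (j == ws.length - 1 && pvStart tag ws)

def pvSpecFull (tag : String) (fmt : String → String) (ws : List String) : List String :=
  ws.mapIdx (fun j w => if pvQF tag ws j then fmt w else w)

-- B's last-tag index at position j, as the Int B stores (-1 = no tag yet)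
def pvLfun (tag : String) (ws : List String) (j : Nat) : Int :=
  match pvDist tag (ws.take (j + 1)) with
  | none => -1
  | some d => (j : Int) - (d : Int)

def pvLastState (tag : String) (ws : List String) : Int :=
  match pvDist tag ws with
  | none => -1
  | some d => (ws.length : Int) - 1 - (d : Int)

theorem pvDist_append (tag : String) (ws : List String) (w : String) :
    pvDist tag (ws ++ [w]) = pvStepD tag (pvDist tag ws) w := by
  simp [pvDist, List.foldl_append]

theorem pvMapIdx_congr {α β : Type} (f g : Nat → α → β) (l : List α)
    (h : ∀ (j : Nat) (hj : j < l.length), f j l[j] = g j l[j]) :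
    l.mapIdx f = l.mapIdx g := by
  apply List.ext_getElem
  · simp
  · intro i h1 h2
    simp only [List.getElem_mapIdx]
    exact h i (by simpa using h1)

theorem pvSpecNoTail_concat (tag : String) (fmt : String → String) (ws : List String) (w : String) :
    pvSpecNoTail tag fmt (ws ++ [w]) =
      pvSpecNoTail tag fmt ws ++ [if pvDist tag (ws ++ [w]) = some 100 then fmt w else w] := by
  unfold pvSpecNoTail
  rw [List.mapIdx_concat]
  congr 1
  · apply pvMapIdx_congr
    intro j hj
    rw [List.take_append_of_le_length (by omega)]
  · rw [List.take_of_length_le (by simp)]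

theorem pvStepA_state (tag : String) (fmt : String → String) (ws : List String) (w : String) :
    pvStepA tag fmt (pvSpecNoTail tag fmt ws, pvStart tag ws, pvCount tag ws) w =
      (pvSpecNoTail tag fmt (ws ++ [w]), pvStart tag (ws ++ [w]), pvCount tag (ws ++ [w])) := by
  rw [pvSpecNoTail_concat]
  unfold pvStepA pvStart pvCount
  rw [pvDist_append]
  unfold pvStepD
  simp only [PySem.Str.isIn_eq]
  by_cases hIn : PySem.Chars.isIn tag.toList w.toList = true
  · simp [hIn]
  · simp only [hIn, if_false, Bool.false_eq_true]
    rcases hD : pvDist tag ws with _ | d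
    · simp
    · by_cases h100 : d < 100
      · by_cases hf : d + 1 = 100
        · have hfi : ((d : Int) + 1 = 100) := by omega
          simp [h100, hf, hfi]
        · have hfi : ¬ ((d : Int) + 1 = 100) := by omega
          have h1 : d + 1 < 100 := by omega
          simp [h100, hf, hfi, h1]
      · have hf : ¬ (d + 1 = 100) := by omega
        have h1 : ¬ (d + 1 < 100) := by omega
        simp [h100, hf, h1]

theorem pvFoldA_eq (tag : String) (fmt : String → String) (ws : List String) :
    ws.foldl (pvStepA tag fmt) ([], false, 0) =
      (pvSpecNoTail tag fmt ws, pvStart tag ws, pvCount tag ws) := by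
  induction ws using List.reverseRecOn with
  | nil => simp [pvSpecNoTail, pvStart, pvCount, pvDist]
  | append_singleton ws w ih =>
    rw [List.foldl_append, ih]
    simp only [List.foldl_cons, List.foldl_nil]
    exact pvStepA_state tag fmt ws w

theorem pvPassA_eq_specFull (tag : String) (fmt : String → String) (ws : List String) :
    pvPassA tag fmt ws = pvSpecFull tag fmt ws := by
  unfold pvPassA
  rw [pvFoldA_eq]
  by_cases hs : pvStart tag ws = true
  · -- tail fix applies: the list ends armed, so the last word gets marked
    have hD : ∃ d, pvDist tag ws = some d ∧ d < 100 := by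
      unfold pvStart at hs
      rcases h : pvDist tag ws with _ | d
      · rw [h] at hs; simp at hs
      · rw [h] at hs; simp at hs; exact ⟨d, rfl, hs⟩
    obtain ⟨d, hD, hd100⟩ := hD
    rcases List.eq_nil_or_concat ws with rfl | ⟨ys, w, rfl⟩
    all_goals try simp only [List.concat_eq_append] at *
    · simp [pvDist] at hD
    · simp only [hs, if_true]
      rw [pvSpecNoTail_concat]
      have hlast : (if pvDist tag (ys ++ [w]) = some 100 then fmt w else w) = w := by
        rw [hD]; simp; omega
      rw [hlast]
      unfold pySetLast
      rw [List.getLast?_concat]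
      simp only [List.dropLast_concat]
      unfold pvSpecFull
      rw [List.mapIdx_concat]
      congr 1
      · unfold pvSpecNoTail
        apply pvMapIdx_congr
        intro j hj
        have hne : ¬ (j = (ys ++ [w]).length - 1) := by simp; omega
        unfold pvQF
        have ht : List.take (j+1) (ys ++ [w]) = List.take (j+1) ys :=
          List.take_append_of_le_length (by omega)
        have hj2 : ¬ j = ys.length := by omega
        simp [ht, hj2]
      · have : pvQF tag (ys ++ [w]) ys.length = true := by
          unfold pvQF
          simp [hs]
        rw [this]
        simp
  · simp only [hs, if_false, Bool.false_eq_true]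
    unfold pvSpecNoTail pvSpecFull
    apply pvMapIdx_congr
    intro j hj
    unfold pvQF
    simp only [hs, Bool.and_false, Bool.or_false, beq_iff_eq]

theorem pvFoldD_lt (tag : String) (ws : List String) :
    ∀ (s : Option Nat) (d : Nat), ws.foldl (pvStepD tag) s = some d →
      d < ws.length ∨ ∃ c, s = some c ∧ d = c + ws.length := by
  induction ws with
  | nil => intro s d h; right; exact ⟨d, h, rfl⟩
  | cons w ws ih =>
    intro s d h
    rcases ih (pvStepD tag s w) d h with h1 | ⟨c, hc, hd⟩
    · left; simpa using Nat.lt_succ_of_lt h1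
    · simp only [pvStepD] at hc
      split at hc
      · left; simp only [Option.some.injEq] at hc; simp only [List.length_cons]; omega
      · cases s with
        | none => simp at hc
        | some c' =>
          right; refine ⟨c', rfl, ?_⟩
          simp only [Option.map_some, Option.some.injEq] at hc
          simp only [List.length_cons]; omega

theorem pvDist_lt_length (tag : String) (ws : List String) (d : Nat)
    (h : pvDist tag ws = some d) : d < ws.length := by
  rcases pvFoldD_lt tag ws none d h with h1 | ⟨c, hc, _⟩
  · exact h1
  · simp at hc

theorem pvLastScan (tag : String) (ws : List String) :
    (PySem.List.enumerate ws).foldl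
      (fun (acc : List Int × Int) jw =>
        let L := if PySem.Str.isIn tag jw.2 then jw.1 else acc.2
        (acc.1 ++ [L], L)) ([], -1)
    = ((List.range ws.length).map (fun j => pvLfun tag ws j), pvLastState tag ws) := by
  induction ws using List.reverseRecOn with
  | nil => simp [PySem.List.enumerate, pvLastState, pvDist]
  | append_singleton ys w ih =>
    rw [PySem.List.enumerate_append, List.foldl_append, ih]
    have hstep : pvDist tag (ys ++ [w]) = pvStepD tag (pvDist tag ys) w := pvDist_append tag ys w
    have henum : PySem.List.enumerate [w] ((0:Int) + ys.length) = [(((ys.length : Int)), w)] := by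
      simp [PySem.List.enumerate_cons]
    rw [henum]
    simp only [List.foldl_cons, List.foldl_nil]
    have hsnd : (if PySem.Str.isIn tag w = true then (ys.length : Int) else pvLastState tag ys)
        = pvLastState tag (ys ++ [w]) := by
      unfold pvLastState
      rw [hstep]
      unfold pvStepD
      simp only [PySem.Str.isIn_eq]
      by_cases hIn : PySem.Chars.isIn tag.toList w.toList = true
      · simp only [hIn, if_true]
        simp only [List.length_append, List.length_singleton]
        push_cast
        omega
      · simp only [hIn, if_false, Bool.false_eq_true]
        rcases hD : pvDist tag ys with _ | d
        · simp
        · simp only [Option.map_some]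
          simp only [List.length_append, List.length_singleton]
          push_cast
          omega
    have hlastIdx : pvLfun tag (ys ++ [w]) ys.length = pvLastState tag (ys ++ [w]) := by
      unfold pvLfun pvLastState
      rw [List.take_of_length_le (by simp)]
      rcases hD : pvDist tag (ys ++ [w]) with _ | d
      · rfl
      · simp only [List.length_append, List.length_singleton]
        push_cast
        omega
    rw [Prod.mk.injEq]
    refine ⟨?_, hsnd⟩
    rw [hsnd, List.length_append, List.length_singleton, List.range_succ, List.map_append]
    congr 1
    · apply List.map_congr_left
      intro j hj
      rw [List.mem_range] at hj
      unfold pvLfun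
      rw [List.take_append_of_le_length (by omega)]
    · simp [hlastIdx]

theorem pvMarkEnds_eq_specFull (tag : String) (fmt : String → String) (ws : List String) :
    pvMarkEnds tag fmt ws = pvSpecFull tag fmt ws := by
  unfold pvMarkEnds
  rw [pvLastScan]
  rw [PySem.List.foldl_append_singleton_eq_map
      (fun (x : Int × (Int × String)) =>
        if 0 ≤ x.2.1 ∧ (x.1 - x.2.1 = 100 ∨ (x.1 = (ws.length : Int) - 1 ∧ x.1 - x.2.1 < 100))
        then fmt x.2.2 else x.2.2)]
  simp only [List.nil_append]
  apply List.ext_getElem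
  · simp [PySem.List.length_enumerate, pvSpecFull]
  · intro j hl hr
    rw [List.getElem_map, PySem.List.getElem_enumerate, List.getElem_zip, List.getElem_map,
        List.getElem_range]
    have hjn : j < ws.length := by simpa [PySem.List.length_enumerate] using hl
    show _ = (pvSpecFull tag fmt ws)[j]
    unfold pvSpecFull
    rw [List.getElem_mapIdx]
    have hQ : (0 ≤ pvLfun tag ws j ∧ ((0:Int) + ↑j - pvLfun tag ws j = 100 ∨
          ((0:Int) + ↑j = (ws.length : Int) - 1 ∧ (0:Int) + ↑j - pvLfun tag ws j < 100)))
        ↔ pvQF tag ws j = true := by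
      unfold pvQF pvLfun
      rcases hD : pvDist tag (ws.take (j + 1)) with _ | d
      · have hstart : j = ws.length - 1 → pvStart tag ws = false := by
          intro hj
          unfold pvStart
          have hws : List.take (j + 1) ws = ws := List.take_of_length_le (by omega)
          rw [hws] at hD
          rw [hD]
        simp only
        by_cases hj : j = ws.length - 1
        · simp [hj, hstart hj]
        · have hne : (j == ws.length - 1) = false := by simp [hj]
          simp [hne]
      · have hdj : d ≤ j := by
          have := pvDist_lt_length tag (List.take (j + 1) ws) d hD
          simp [List.length_take] at this
          omega
        simp only
        by_cases hj : j = ws.length - 1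
        · have hws : List.take (j + 1) ws = ws := List.take_of_length_le (by omega)
          have hstart : pvStart tag ws = decide (d < 100) := by
            unfold pvStart
            rw [← hws, hD]
          simp [hj, hstart]
          constructor
          · intro h
            omega
          · intro h
            omega
        · have hne : (j == ws.length - 1) = false := by simp [hj]
          simp [hne]
          constructor
          · intro h
            omega
          · intro h
            omega
    by_cases hb : pvQF tag ws j = true
    · rw [if_pos (hQ.mpr hb), if_pos hb]
    · rw [if_neg (fun h => hb (hQ.mp h)), if_neg hb]

theorem pvPass_eq (tag : String) (fmt : String → String) (ws : List String) :
    pvPassA tag fmt ws = pvMarkEnds tag fmt ws := by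
  rw [pvPassA_eq_specFull, pvMarkEnds_eq_specFull]

-- ===== VERDICT (by name: the statement is the Claim_ definition above) =====
theorem highlight_context_spec : Claim_equal_highlight_context := by
  intro c _
  unfold Spec_highlight_context
  simp only [highlight_context, highlight_context_alt, pvPass_eq]
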